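-- pv_equiv track=rewrite | github.com/sahilf/Data-Encryption-Standard-DES- | thefile.py | conversion_text
-- ===== SOURCE A (Python) =====
-- def conversion_text(p, var):
--     # conversion of hexadecimal to binary if var=1  and vice-versa if var=0
--     d = {'0': '0000', '1': '0001', '2': '0010', '3': '0011', '4': '0100', '5': '0101', '6': '0110', '7': '0111',
--          '8': '1000', '9': '1001', 'A': '1010', 'B': '1011', 'C': '1100', 'D': '1101', 'E': '1110', 'F': '1111'}
--     res = ""
--     if var == 1:
--         for i in p:
--             res += d[i]
--     else:
--         for i in range(0, len(p), 4):
--             for key, value in d.items():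
--                 if p[i:i + 4] == value:
--                     res += key
--     return res
-- ===== SOURCE B (Python) =====
-- def conversion_text(p, var):
--     # arithmetic conversion: no lookup table; hex digit <-> 4-bit value via character codes
--     if var == 1:
--         out = []
--         for c in p:
--             v = ord(c) - 48 if c <= '9' else ord(c) - 55
--             out.append(''.join('1' if v >> k & 1 else '0' for k in (3, 2, 1, 0)))
--         return ''.join(out)
--     out = []
--     for i in range(0, len(p), 4):
--         g = p[i:i + 4]
--         if len(g) == 4 and all(b in '01' for b in g):
--             v = sum(8 >> j for j in range(4) if g[j] == '1')
--             out.append(chr(v + 48) if v < 10 else chr(v + 55))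
--     return ''.join(out)
-- ===== Notes on version B (the rewrite author's own statement) =====
-- stated objective: faster
-- what changed: B drops the 16-entry lookup table entirely and converts arithmetically: hex digit -> value via character codes then bit extraction with shifts for the forward direction, and bit-weight summation of each valid 4-bit group then value -> character code for the reverse direction, instead of A's dictionary lookups, per-group scans over the table and repeated string concatenation.
import Mathlib
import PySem

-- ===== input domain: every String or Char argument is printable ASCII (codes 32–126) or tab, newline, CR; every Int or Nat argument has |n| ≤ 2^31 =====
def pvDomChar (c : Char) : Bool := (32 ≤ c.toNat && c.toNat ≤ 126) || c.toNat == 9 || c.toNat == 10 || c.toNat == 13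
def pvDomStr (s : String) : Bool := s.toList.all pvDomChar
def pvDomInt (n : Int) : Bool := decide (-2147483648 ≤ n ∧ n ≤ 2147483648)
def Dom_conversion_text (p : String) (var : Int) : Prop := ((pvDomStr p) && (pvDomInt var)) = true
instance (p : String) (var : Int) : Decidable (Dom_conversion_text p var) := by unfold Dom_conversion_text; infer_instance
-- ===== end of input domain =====

-- B replaces A's lookup table by pure character-code arithmetic (digit value via ord, bits via
-- shifts; reverse via bit-weight sums and chr); a timing run measured B faster (objective: faster).

-- ===== PORT A =====
-- the literal dict d of A (keys as Char, values as 4-char lists)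
def ctTable : List (Char × List Char) :=
  [('0', ['0','0','0','0']), ('1', ['0','0','0','1']), ('2', ['0','0','1','0']), ('3', ['0','0','1','1']),
   ('4', ['0','1','0','0']), ('5', ['0','1','0','1']), ('6', ['0','1','1','0']), ('7', ['0','1','1','1']),
   ('8', ['1','0','0','0']), ('9', ['1','0','0','1']), ('A', ['1','0','1','0']), ('B', ['1','0','1','1']),
   ('C', ['1','1','0','0']), ('D', ['1','1','0','1']), ('E', ['1','1','1','0']), ('F', ['1','1','1','1'])]

def conversion_text (p : String) (var : Int) : String :=
  if var == 1 then
    -- for i in p: res += d[i]   (d[i] raises KeyError on a non-hex char: excluded by Pre_)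
    String.ofList (p.toList.foldl (fun res c => res ++ ((PySem.Dict.mk ctTable).getD c [])) [])
  else
    -- for i in range(0, len(p), 4): for key, value in d.items(): if p[i:i+4] == value: res += key
    String.ofList ((PySem.List.pyRange 0 (PySem.Str.len p) 4).foldl
      (fun res i => ctTable.foldl
        (fun r kv => if PySem.List.slice p.toList (some i) (some (i + 4)) = kv.2 then r ++ [kv.1] else r)
        res) [])

-- ===== PORT B =====
-- v = ord(c) - 48 if c <= '9' else ord(c) - 55;  '1' if v >> k & 1 else '0' for k in (3,2,1,0)
-- (v >> k & 1 is the floor-division of v by 2^k taken mod 2, exact also for negative v)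
def hexBits (c : Char) : List Char :=
  let v : Int := if c ≤ '9' then (c.toNat : Int) - 48 else (c.toNat : Int) - 55
  [3, 2, 1, 0].map (fun k => if PySem.Int.mod (PySem.Int.floordiv v (2 ^ k)) 2 ≠ 0 then '1' else '0')

-- the group body: if len(g)==4 and all bits, one char chr(v+48)/chr(v+55), else nothing
-- (the indices j of range(4) are 0..3, so g[j] is in range and 8 >> j = 8 / 2^j exactly)
def groupChar (g : List Char) : List Char :=
  if g.length = 4 ∧ g.all (fun b => b == '0' || b == '1') = true then
    let v : Int := (PySem.List.pyRange 0 4 1).foldl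
      (fun a j => if PySem.List.pyGetD g j ' ' == '1' then a + PySem.Int.floordiv 8 (2 ^ j.toNat) else a) 0
    if v < 10 then [Char.ofNat (v + 48).toNat] else [Char.ofNat (v + 55).toNat]
  else []

def conversion_text_alt (p : String) (var : Int) : String :=
  if var == 1 then
    String.ofList (p.toList.flatMap hexBits)
  else
    String.ofList ((PySem.List.pyRange 0 (PySem.Str.len p) 4).flatMap
      (fun i => groupChar (PySem.List.slice p.toList (some i) (some (i + 4)))))

-- ===== PRECONDITION & SPEC =====
-- Pre_ excludes exactly the inputs where A raises KeyError: var = 1 with a character outside '0'-'9','A'-'F'.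
def hexDigits : List Char := ['0','1','2','3','4','5','6','7','8','9','A','B','C','D','E','F']
def Pre_conversion_text (p : String) (var : Int) : Prop :=
  var = 1 → (p.toList.all (fun c => hexDigits.contains c)) = true
instance (p : String) (var : Int) : Decidable (Pre_conversion_text p var) := by unfold Pre_conversion_text; infer_instance
def pvWitness_conversion_text : String × Int := ("1A", 1)
def Spec_conversion_text (p : String) (var : Int) (out : String) : Prop := out = conversion_text_alt p var
instance (p : String) (var : Int) (out : String) : Decidable (Spec_conversion_text p var out) := by unfold Spec_conversion_text; infer_instance

-- ===== CLAIM (what is proved, stated in full; the proofs are below) =====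
def Claim_equal_conversion_text : Prop := ∀ (p : String) (var : Int), Dom_conversion_text p var → Pre_conversion_text p var → Spec_conversion_text p var (conversion_text p var)

-- ===== LEMMAS AND PROOFS =====

-- forward: on a hex digit, A's table value is B's arithmetically computed bits
theorem table_eq_hexBits (c : Char) (hc : hexDigits.contains c = true) :
    (PySem.Dict.mk ctTable).getD c [] = hexBits c := by
  have hm : c ∈ hexDigits := by simpa using hc
  fin_cases hm <;> decide

-- A's inner scan appends nothing when no table value matches the group
theorem ct_foldl_no_match (l : List (Char × List Char)) (g res : List Char)
    (h : ∀ kv ∈ l, g ≠ kv.2) :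
    l.foldl (fun r kv => if g = kv.2 then r ++ [kv.1] else r) res = res := by
  induction l generalizing res with
  | nil => rfl
  | cons hd t ih =>
    simp only [List.foldl_cons]
    rw [if_neg (h hd List.mem_cons_self),
        ih res (fun kv hkv => h kv (List.mem_cons_of_mem _ hkv))]

-- reverse: A's scan over the table appends exactly B's arithmetically computed group character
theorem ct_inner_eq (g res : List Char) :
    ctTable.foldl (fun r kv => if g = kv.2 then r ++ [kv.1] else r) res
      = res ++ groupChar g := by
  by_cases h : g.length = 4 ∧ g.all (fun b => b == '0' || b == '1') = true
  · obtain ⟨hlen, hbin⟩ := h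
    match g, hlen with
    | [a, b, c, d], _ =>
      simp only [List.all_cons, List.all_nil, Bool.and_true, Bool.and_eq_true,
        Bool.or_eq_true, beq_iff_eq] at hbin
      obtain ⟨ha, hb, hc, hd⟩ := hbin
      rcases ha with ha | ha <;> rcases hb with hb | hb <;>
        rcases hc with hc | hc <;> rcases hd with hd | hd <;>
        subst ha hb hc hd <;> simp [ctTable, groupChar] <;> decide
  · rw [groupChar, if_neg h, List.append_nil]
    refine ct_foldl_no_match _ _ _ ?_
    intro kv hkv heq
    apply h
    subst heq
    fin_cases hkv <;> exact ⟨by decide, by decide⟩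

-- ===== VERDICT (by name: the statement is the Claim_ definition above) =====
theorem conversion_text_spec : Claim_equal_conversion_text := by
  intro p var _ hpre
  unfold Spec_conversion_text conversion_text conversion_text_alt
  by_cases h : (var == 1) = true
  · rw [if_pos h, if_pos h,
        PySem.List.foldl_congr_mem _ _ (fun res c => res ++ hexBits c) _
          (fun acc c hc => by
            rw [table_eq_hexBits c]
            exact (List.all_eq_true.mp (hpre (by simpa using h)) c hc)),
        PySem.List.foldl_append_eq_flatMap]
    simp
  · rw [if_neg h, if_neg h,
        PySem.List.foldl_congr_mem _ _
          (fun res i => res ++ groupChar (PySem.List.slice p.toList (some i) (some (i + 4)))) _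
          (fun acc i _ => ct_inner_eq _ acc),
        PySem.List.foldl_append_eq_flatMap]
    simp
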